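-- pv_equiv track=rewrite | github.com/lmingora/demo_agent | src/main.py | _results_to_context_md
-- ===== SOURCE A (Python) =====
-- def _results_to_context_md(results: list[dict], max_chars: int = 4000) -> str:
--     """
--     Construye un 'context_md' (markdown) a partir de rag_search.results.
--     Limita tamaño para no inflar el prompt de cierre.
--     """
--     if not results:
--         return ""
--     lines = []
--     used = 0
--     for i, r in enumerate(results, 1):
--         src = r.get("source", "unknown")
--         txt = (r.get("text") or "").strip().replace("\n", " ")
--         piece = f"- [{i}] ({src}) {txt}"
--         if used + len(piece) > max_chars:
--             break
--         lines.append(piece)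
--         used += len(piece)
--     return "\n".join(lines)
-- ===== SOURCE B (Python) =====
-- def _results_to_context_md(results: list[dict], max_chars: int = 4000) -> str:
--     # Two-phase: format all pieces, then count the accepted prefix via cumulative sums.
--     pieces = [
--         "- [{}] ({}) {}".format(
--             i,
--             r.get("source", "unknown"),
--             (r.get("text") or "").strip().replace("\n", " "),
--         )
--         for i, r in enumerate(results, 1)
--     ]
--     cums = []
--     total = 0
--     for p in pieces:
--         total += len(p)
--         cums.append(total)
--     n = sum(1 for c in cums if c <= max_chars)  # lengths are >= 0, so cums is nondecreasing: this is the first-exceedance cut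
--     return "\n".join(pieces[:n])
-- ===== Notes on version B (the rewrite author's own statement) =====
-- stated objective: alternative
-- what changed: A builds the accepted lines and running total in one loop that breaks on the first overflow; B first formats every piece with a comprehension, then computes cumulative lengths and counts how many cumulative sums stay within max_chars (valid because lengths are nonnegative, so the sums are nondecreasing and counting equals the first-exceedance cut), and joins that prefix.
import Mathlib
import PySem

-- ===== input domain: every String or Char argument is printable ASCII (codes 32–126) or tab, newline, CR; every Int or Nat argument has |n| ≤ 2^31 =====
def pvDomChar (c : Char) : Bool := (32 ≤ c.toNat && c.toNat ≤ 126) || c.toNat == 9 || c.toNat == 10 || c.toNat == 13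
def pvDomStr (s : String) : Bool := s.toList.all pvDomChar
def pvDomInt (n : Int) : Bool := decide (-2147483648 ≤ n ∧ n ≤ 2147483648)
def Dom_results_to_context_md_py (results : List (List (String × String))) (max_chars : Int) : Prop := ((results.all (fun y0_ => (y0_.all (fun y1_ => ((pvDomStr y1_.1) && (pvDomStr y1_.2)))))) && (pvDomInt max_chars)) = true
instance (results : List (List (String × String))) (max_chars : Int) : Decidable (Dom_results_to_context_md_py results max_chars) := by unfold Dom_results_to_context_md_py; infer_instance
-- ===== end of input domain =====

-- B rebuilds the result in two phases (format all pieces, then count the accepted prefix by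
-- cumulative length) instead of A's single break-on-overflow accumulation loop; objective: alternative decomposition.

-- shared formatting of one piece: f"- [{i}] ({src}) {txt}" with src = r.get("source","unknown")
-- and txt = (r.get("text") or "").strip().replace("\n", " ")  (identical f-string in A and B)
def pvPiece (i : Int) (r : List (String × String)) : String :=
  let d := PySem.Dict.ofList r
  let src := d.getD "source" "unknown"
  let txt0 := match d.get? "text" with          -- (r.get("text") or "")
    | some s => if s = "" then "" else s
    | none => ""
  let txt := PySem.Str.replace (PySem.Str.strip txt0) "\n" " "
  String.ofList ("- [".toList ++ (PySem.Int.toStr i).toList ++ "] (".toList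
              ++ src.toList ++ ") ".toList ++ txt.toList)

-- ===== PORT A =====
-- the for-loop with `lines`, `used` and `break`
def pvLoopA (max_chars : Int) : List (Int × List (String × String)) → List String → Int → List String
  | [], lines, _ => lines
  | (i, r) :: rest, lines, used =>
    let piece := pvPiece i r
    if used + PySem.Str.len piece > max_chars then lines
    else pvLoopA max_chars rest (lines ++ [piece]) (used + PySem.Str.len piece)

def results_to_context_md_py (results : List (List (String × String))) (max_chars : Int) : String :=
  if results = [] then ""
  else PySem.Str.join "\n" (pvLoopA max_chars (PySem.List.enumerate results 1) [] 0)

-- ===== PORT B =====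
-- running cumulative sums (the `cums` loop of Source B)
def pvCums : List Int → Int → List Int
  | [], _ => []
  | x :: xs, t => (t + x) :: pvCums xs (t + x)

def results_to_context_md_py_alt (results : List (List (String × String))) (max_chars : Int) : String :=
  let pieces := (PySem.List.enumerate results 1).map (fun p => pvPiece p.1 p.2)
  let cums := pvCums (pieces.map PySem.Str.len) 0
  let n := (cums.filter (fun c => decide (c ≤ max_chars))).length
  PySem.Str.join "\n" (pieces.take n)

-- ===== PRECONDITION & SPEC =====
def Spec_results_to_context_md_py (results : List (List (String × String))) (max_chars : Int) (out : String) : Prop := out = results_to_context_md_py_alt results max_chars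
instance (results : List (List (String × String))) (max_chars : Int) (out : String) : Decidable (Spec_results_to_context_md_py results max_chars out) := by unfold Spec_results_to_context_md_py; infer_instance

-- ===== CLAIM (what is proved, stated in full; the proofs are below) =====
def Claim_equal_results_to_context_md_py : Prop := ∀ (results : List (List (String × String))) (max_chars : Int), Dom_results_to_context_md_py results max_chars → Spec_results_to_context_md_py results max_chars (results_to_context_md_py results max_chars)

-- ===== LEMMAS AND PROOFS =====

theorem pvLen_nonneg (s : String) : 0 ≤ PySem.Str.len s := by
  simp [PySem.Str.len_eq]

theorem pvCums_ge (xs : List Int) (t : Int) (h : ∀ x ∈ xs, 0 ≤ x) :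
    ∀ c ∈ pvCums xs t, t ≤ c := by
  induction xs generalizing t with
  | nil => simp [pvCums]
  | cons x xs ih =>
    intro c hc
    have hx : 0 ≤ x := h x (by simp)
    simp only [pvCums, List.mem_cons] at hc
    rcases hc with rfl | hc
    · omega
    · have := ih (t + x) (fun y hy => h y (by simp [hy])) c hc
      omega

theorem pvLoopA_eq (mc : Int) (l : List (Int × List (String × String)))
    (acc : List String) (used : Int) :
    pvLoopA mc l acc used =
      acc ++ (l.map (fun p => pvPiece p.1 p.2)).take
        ((pvCums ((l.map (fun p => pvPiece p.1 p.2)).map PySem.Str.len) used).filter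
          (fun c => decide (c ≤ mc))).length := by
  induction l generalizing acc used with
  | nil => simp [pvLoopA, pvCums]
  | cons hd tl ih =>
    obtain ⟨i, r⟩ := hd
    simp only [pvLoopA, List.map_cons, pvCums]
    set L := PySem.Str.len (pvPiece i r) with hL
    by_cases hgt : used + L > mc
    · rw [if_pos hgt]
      have hfilter : (pvCums (tl.map (PySem.Str.len ∘ fun p => pvPiece p.1 p.2))
          (used + L)).filter (fun c => decide (c ≤ mc)) = [] := by
        rw [List.filter_eq_nil_iff]
        intro c hc
        have h0 : ∀ x ∈ tl.map (PySem.Str.len ∘ fun p => pvPiece p.1 p.2), 0 ≤ x := by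
          intro x hx
          simp only [List.mem_map] at hx
          obtain ⟨s, hs, rfl⟩ := hx
          exact pvLen_nonneg _
        have := pvCums_ge _ _ h0 c hc
        simp only [decide_eq_true_eq]
        omega
      simp only [List.map_map, List.filter_cons, decide_eq_true_eq, hfilter]
      simp [show ¬ (used + L ≤ mc) by omega]
    · rw [if_neg hgt]
      have hle : used + L ≤ mc := by omega
      rw [ih]
      simp [hle, List.append_assoc]

theorem results_to_context_md_py_spec_aux (results : List (List (String × String))) (max_chars : Int) :
    results_to_context_md_py results max_chars = results_to_context_md_py_alt results max_chars := by
  unfold results_to_context_md_py results_to_context_md_py_alt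
  by_cases h : results = []
  · subst h
    simp [PySem.List.enumerate, pvCums]
    decide
  · rw [if_neg h, pvLoopA_eq]
    simp

-- ===== VERDICT (by name: the statement is the Claim_ definition above) =====
theorem results_to_context_md_py_spec : Claim_equal_results_to_context_md_py := by
  intro results max_chars _
  exact results_to_context_md_py_spec_aux results max_chars
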